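-- pv_equiv track=rewrite | github.com/ZedRover/QuantUtils | qt_utils/quant_utils.py | exchange_generator
-- ===== SOURCE A (Python) =====
-- def exchange_generator(prod):
--     prod = ''.join([i for i in prod if not i.isdigit()])
--     if prod.upper() in ['I', "J", "JM", 'A', 'B', 'M', 'C', 'CS', 'V', 'EB', 'EG',
--                         'PG', 'RR', 'L', 'BB', 'FB', 'PP', 'P', 'Y', 'M', 'LH', 'JD']:
--         exchange = "dce"
--     elif prod.upper() in ['CU', 'PB', 'AL', 'ZN', 'SN', 'NI', 'SS', "RB",
--                           'HC', 'AG', 'AU', 'BU', 'FU', 'SP', 'SC', 'RU', 'WR','BC', 'NR',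
--                           'LU']:
--         exchange = "shfe"
--     elif prod.upper() in ['IF', 'IC', 'IH', 'T', 'TF', 'TS']:
--         exchange = "cffex"
--     elif prod.upper() in ['TA', 'AP', 'CJ', 'MA', 'CJ', 'FG', 'SA', 'OI', 'ZC','CY', 'PF',
--                           'CF', 'SM', 'PK', 'SR', 'RM', 'SF', 'UR']:
--         exchange = "czce"
--     else:
--         raise ValueError('No exchange for product {}'.format(prod))
--     return exchange
-- ===== SOURCE B (Python) =====
-- # code -> exchange pairs, strictly sorted by code (duplicates in A's lists collapsed)
-- _SORTED_CODES = [
--     ("A", "dce"), ("AG", "shfe"), ("AL", "shfe"), ("AP", "czce"),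
--     ("AU", "shfe"), ("B", "dce"), ("BB", "dce"), ("BC", "shfe"),
--     ("BU", "shfe"), ("C", "dce"), ("CF", "czce"), ("CJ", "czce"),
--     ("CS", "dce"), ("CU", "shfe"), ("CY", "czce"), ("EB", "dce"),
--     ("EG", "dce"), ("FB", "dce"), ("FG", "czce"), ("FU", "shfe"),
--     ("HC", "shfe"), ("I", "dce"), ("IC", "cffex"), ("IF", "cffex"),
--     ("IH", "cffex"), ("J", "dce"), ("JD", "dce"), ("JM", "dce"),
--     ("L", "dce"), ("LH", "dce"), ("LU", "shfe"), ("M", "dce"),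
--     ("MA", "czce"), ("NI", "shfe"), ("NR", "shfe"), ("OI", "czce"),
--     ("P", "dce"), ("PB", "shfe"), ("PF", "czce"), ("PG", "dce"),
--     ("PK", "czce"), ("PP", "dce"), ("RB", "shfe"), ("RM", "czce"),
--     ("RR", "dce"), ("RU", "shfe"), ("SA", "czce"), ("SC", "shfe"),
--     ("SF", "czce"), ("SM", "czce"), ("SN", "shfe"), ("SP", "shfe"),
--     ("SR", "czce"), ("SS", "shfe"), ("T", "cffex"), ("TA", "czce"),
--     ("TF", "cffex"), ("TS", "cffex"), ("UR", "czce"), ("V", "dce"),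
--     ("WR", "shfe"), ("Y", "dce"), ("ZC", "czce"), ("ZN", "shfe"),
-- ]
--
--
-- def exchange_generator(prod):
--     prod = ''.join(i for i in prod if not i.isdigit())
--     key = prod.upper()
--     lo, hi = 0, len(_SORTED_CODES)
--     while lo < hi:
--         mid = (lo + hi) // 2
--         code, exchange = _SORTED_CODES[mid]
--         if code == key:
--             return exchange
--         if code < key:
--             lo = mid + 1
--         else:
--             hi = mid
--     raise ValueError('No exchange for product {}'.format(prod))
-- ===== Notes on version B (the rewrite author's own statement) =====
-- stated objective: alternative
-- what changed: Replaces the four sequential list-membership if/elif branches by a hand-written binary search over one strictly sorted (code, exchange) table.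
import Mathlib
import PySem

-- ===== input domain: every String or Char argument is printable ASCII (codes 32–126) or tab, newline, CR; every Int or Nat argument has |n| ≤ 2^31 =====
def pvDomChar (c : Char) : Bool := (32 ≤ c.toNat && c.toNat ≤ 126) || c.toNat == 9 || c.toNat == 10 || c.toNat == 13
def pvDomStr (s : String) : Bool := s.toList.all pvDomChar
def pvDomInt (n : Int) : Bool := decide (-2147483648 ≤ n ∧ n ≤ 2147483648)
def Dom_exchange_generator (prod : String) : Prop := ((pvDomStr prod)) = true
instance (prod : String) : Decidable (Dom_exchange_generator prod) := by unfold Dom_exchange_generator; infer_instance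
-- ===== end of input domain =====

-- B replaces A's four sequential list-membership if/elif branches by a hand-written
-- binary search over one strictly sorted (code, exchange) table (alternative).
-- Where Python raises ValueError (unknown code) both A and B raise; those inputs are
-- excluded by Pre_ and both ports return "".

-- ===== PORT A =====
-- the if/elif chain of A as a function of the uppercased code
def pvChain (u : String) : String :=
  if u ∈ ["I", "J", "JM", "A", "B", "M", "C", "CS", "V", "EB", "EG",
      "PG", "RR", "L", "BB", "FB", "PP", "P", "Y", "M", "LH", "JD"] then "dce"
  else if u ∈ ["CU", "PB", "AL", "ZN", "SN", "NI", "SS", "RB",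
      "HC", "AG", "AU", "BU", "FU", "SP", "SC", "RU", "WR", "BC", "NR", "LU"] then "shfe"
  else if u ∈ ["IF", "IC", "IH", "T", "TF", "TS"] then "cffex"
  else if u ∈ ["TA", "AP", "CJ", "MA", "CJ", "FG", "SA", "OI", "ZC", "CY", "PF",
      "CF", "SM", "PK", "SR", "RM", "SF", "UR"] then "czce"
  else ""  -- Python: raise ValueError (excluded by Pre_)

def exchange_generator (prod : String) : String :=
  -- prod = ''.join([i for i in prod if not i.isdigit()])
  let prod := String.ofList ((prod.toList).filter (fun i => !PySem.Chars.isdigit i))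
  pvChain (PySem.Str.upper prod)

-- ===== PORT B =====
-- _SORTED_CODES: the (code, exchange) pairs, strictly sorted by code
def pvSortedCodes : List (String × String) :=
  [("A", "dce"), ("AG", "shfe"), ("AL", "shfe"), ("AP", "czce"),
   ("AU", "shfe"), ("B", "dce"), ("BB", "dce"), ("BC", "shfe"),
   ("BU", "shfe"), ("C", "dce"), ("CF", "czce"), ("CJ", "czce"),
   ("CS", "dce"), ("CU", "shfe"), ("CY", "czce"), ("EB", "dce"),
   ("EG", "dce"), ("FB", "dce"), ("FG", "czce"), ("FU", "shfe"),
   ("HC", "shfe"), ("I", "dce"), ("IC", "cffex"), ("IF", "cffex"),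
   ("IH", "cffex"), ("J", "dce"), ("JD", "dce"), ("JM", "dce"),
   ("L", "dce"), ("LH", "dce"), ("LU", "shfe"), ("M", "dce"),
   ("MA", "czce"), ("NI", "shfe"), ("NR", "shfe"), ("OI", "czce"),
   ("P", "dce"), ("PB", "shfe"), ("PF", "czce"), ("PG", "dce"),
   ("PK", "czce"), ("PP", "dce"), ("RB", "shfe"), ("RM", "czce"),
   ("RR", "dce"), ("RU", "shfe"), ("SA", "czce"), ("SC", "shfe"),
   ("SF", "czce"), ("SM", "czce"), ("SN", "shfe"), ("SP", "shfe"),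
   ("SR", "czce"), ("SS", "shfe"), ("T", "cffex"), ("TA", "czce"),
   ("TF", "cffex"), ("TS", "cffex"), ("UR", "czce"), ("V", "dce"),
   ("WR", "shfe"), ("Y", "dce"), ("ZC", "czce"), ("ZN", "shfe")]

-- Python's '<' on strings, spelled out lexicographically over the characters
-- (exact on the ASCII domain; kernel-reducible unlike String's own order)
def pvCharsLt : List Char → List Char → Bool
  | _, [] => false
  | [], _ :: _ => true
  | a :: as, b :: bs =>
    if a.toNat < b.toNat then true
    else if b.toNat < a.toNat then false
    else pvCharsLt as bs

-- the while-loop of B: binary search on the interval [lo, hi); the fuel argument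
-- only bounds the iteration count (hi - lo strictly shrinks, so fuel = hi - lo suffices)
def pvBsearch : Nat → String → Nat → Nat → String
  | 0, _, _, _ => ""
  | fuel + 1, key, lo, hi =>
    if lo < hi then
      let mid := (lo + hi) / 2
      let p := pvSortedCodes.getD mid ("", "")
      if p.1 == key then p.2
      else if pvCharsLt p.1.toList key.toList then pvBsearch fuel key (mid + 1) hi
      else pvBsearch fuel key lo mid
    else ""  -- Python: raise ValueError (excluded by Pre_)

def exchange_generator_alt (prod : String) : String :=
  let prod := String.ofList ((prod.toList).filter (fun i => !PySem.Chars.isdigit i))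
  let key := PySem.Str.upper prod
  pvBsearch pvSortedCodes.length key 0 pvSortedCodes.length

-- ===== PRECONDITION & SPEC =====
-- all product codes known to A (the union of the four groups)
def pvAllCodes : List String :=
  ["I", "J", "JM", "A", "B", "M", "C", "CS", "V", "EB", "EG",
   "PG", "RR", "L", "BB", "FB", "PP", "P", "Y", "LH", "JD",
   "CU", "PB", "AL", "ZN", "SN", "NI", "SS", "RB",
   "HC", "AG", "AU", "BU", "FU", "SP", "SC", "RU", "WR", "BC", "NR", "LU",
   "IF", "IC", "IH", "T", "TF", "TS",
   "TA", "AP", "CJ", "MA", "FG", "SA", "OI", "ZC", "CY", "PF",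
   "CF", "SM", "PK", "SR", "RM", "SF", "UR"]

-- Pre_ excludes exactly the inputs whose digit-stripped, uppercased code is unknown:
-- there Python A (and B) raises ValueError instead of returning a string.
def Pre_exchange_generator (prod : String) : Prop :=
  PySem.Str.upper (String.ofList ((prod.toList).filter (fun i => !PySem.Chars.isdigit i))) ∈ pvAllCodes
instance (prod : String) : Decidable (Pre_exchange_generator prod) := by
  unfold Pre_exchange_generator; infer_instance

def pvWitness_exchange_generator : String := "ag2105"

def Spec_exchange_generator (prod : String) (out : String) : Prop := out = exchange_generator_alt prod
instance (prod : String) (out : String) : Decidable (Spec_exchange_generator prod out) := by unfold Spec_exchange_generator; infer_instance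

-- ===== CLAIM (what is proved, stated in full; the proofs are below) =====
def Claim_equal_exchange_generator : Prop := ∀ (prod : String), Dom_exchange_generator prod → Pre_exchange_generator prod → Spec_exchange_generator prod (exchange_generator prod)

-- ===== LEMMAS AND PROOFS =====
set_option maxRecDepth 65536 in
theorem pv_all_codes_agree :
    pvAllCodes.all (fun u => pvChain u == pvBsearch pvSortedCodes.length u 0 pvSortedCodes.length) = true := by
  decide

theorem pv_chain_eq_bsearch (u : String) (hu : u ∈ pvAllCodes) :
    pvChain u = pvBsearch pvSortedCodes.length u 0 pvSortedCodes.length := by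
  have h := List.all_eq_true.mp pv_all_codes_agree u hu
  simpa using h

-- ===== VERDICT (by name: the statement is the Claim_ definition above) =====
theorem exchange_generator_spec : Claim_equal_exchange_generator := by
  intro prod _ hpre
  unfold Spec_exchange_generator exchange_generator exchange_generator_alt
  exact pv_chain_eq_bsearch _ hpre
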